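-- pv_equiv track=rewrite | github.com/DejanGovc/CubicalPy | functions.py | fromzeroone
-- ===== SOURCE A (Python) =====
-- def fromzeroone(zo,tab):
--     fromzo = []
--     lst = [int(bit) for bit in bin(zo)[2:]]
--     lst.reverse()
--     lst += [0 for _ in range(len(tab)-len(lst))]
--     for i in range(len(lst)):
--         if lst[i] == 1:
--             fromzo.append(tab[i])
--     return(sorted(fromzo))
-- ===== SOURCE B (Python) =====
-- def fromzeroone(zo, tab):
--     res = []
--     i = 0
--     while zo:
--         if zo & 1:
--             res.append(tab[i])
--         zo >>= 1
--         i += 1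
--     return sorted(res)
-- ===== Notes on version B (the rewrite author's own statement) =====
-- stated objective: idiomatic
-- what changed: B consumes the integer directly with a while-loop testing the low bit and shifting, instead of building a reversed, zero-padded digit list from the bin() string and indexing over its range.
import Mathlib
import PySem

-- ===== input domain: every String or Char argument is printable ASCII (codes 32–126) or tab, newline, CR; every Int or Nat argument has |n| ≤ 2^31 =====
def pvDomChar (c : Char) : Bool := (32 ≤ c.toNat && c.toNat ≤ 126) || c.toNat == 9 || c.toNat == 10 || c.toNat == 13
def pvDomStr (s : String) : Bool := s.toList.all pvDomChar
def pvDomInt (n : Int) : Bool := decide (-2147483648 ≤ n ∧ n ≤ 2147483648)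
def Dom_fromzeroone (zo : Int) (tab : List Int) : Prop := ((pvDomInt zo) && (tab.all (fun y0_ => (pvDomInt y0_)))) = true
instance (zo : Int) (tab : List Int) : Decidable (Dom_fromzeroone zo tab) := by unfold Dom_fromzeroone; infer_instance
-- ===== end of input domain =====

-- B consumes the integer directly (test low bit, shift) instead of building a reversed,
-- zero-padded bin() digit list and indexing over its range; objective: idiomatic.


-- ===== PORT A =====
-- binary digits of n, least-significant first (bin(n)[2:] read reversed); exact for n ≥ 1
def binDigitsRev (n : Nat) : List Int :=
  if n = 0 then [] else (n % 2 : Nat) :: binDigitsRev (n / 2)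
decreasing_by exact Nat.div_lt_self (Nat.pos_of_ne_zero (by assumption)) (by norm_num)

def fromzeroone (zo : Int) (tab : List Int) : List Int :=
  -- lst = [int(bit) for bit in bin(zo)[2:]] (msb first); exact for zo ≥ 0 (zo < 0 raises, outside Pre_)
  let lst1 : List Int := if zo = 0 then [0] else (binDigitsRev zo.toNat).reverse
  -- lst.reverse()
  let lst2 := lst1.reverse
  -- lst += [0 for _ in range(len(tab)-len(lst))]
  let lst := lst2 ++ List.replicate (tab.length - lst2.length) 0
  -- for i in range(len(lst)): if lst[i] == 1: fromzo.append(tab[i])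
  let fromzo := (PySem.List.pyRange 0 lst.length 1).foldl
    (fun acc i => if PySem.List.pyGetD lst i 0 = 1 then acc ++ [PySem.List.pyGetD tab i 0] else acc) []
  PySem.List.sorted fromzo id false

-- ===== PORT B =====
-- while zo: if zo & 1: res.append(tab[i]); zo >>= 1; i += 1
def altGo (zo : Nat) (i : Nat) (tab : List Int) (res : List Int) : List Int :=
  if zo = 0 then res
  else altGo (zo / 2) (i + 1) tab
        (if zo % 2 = 1 then res ++ [PySem.List.pyGetD tab (i : Int) 0] else res)
decreasing_by exact Nat.div_lt_self (Nat.pos_of_ne_zero (by assumption)) (by norm_num)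

def fromzeroone_alt (zo : Int) (tab : List Int) : List Int :=
  PySem.List.sorted (altGo zo.toNat 0 tab []) id false

-- ===== PRECONDITION & SPEC =====
-- Pre_ excludes exactly the inputs where Python A raises: zo < 0 (ValueError from int('b'))
-- and zo ≥ 2^len(tab) (IndexError on tab[i]).
def Pre_fromzeroone (zo : Int) (tab : List Int) : Prop :=
  0 ≤ zo ∧ zo < 2 ^ tab.length
instance (zo : Int) (tab : List Int) : Decidable (Pre_fromzeroone zo tab) := by
  unfold Pre_fromzeroone; infer_instance
def pvWitness_fromzeroone : Int × List Int := (5, [10, 20, 30])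

def Spec_fromzeroone (zo : Int) (tab : List Int) (out : List Int) : Prop := out = fromzeroone_alt zo tab
instance (zo : Int) (tab : List Int) (out : List Int) : Decidable (Spec_fromzeroone zo tab out) := by unfold Spec_fromzeroone; infer_instance

-- ===== CLAIM (what is proved, stated in full; the proofs are below) =====
def Claim_equal_fromzeroone : Prop := ∀ (zo : Int) (tab : List Int), Dom_fromzeroone zo tab → Pre_fromzeroone zo tab → Spec_fromzeroone zo tab (fromzeroone zo tab)

-- ===== LEMMAS AND PROOFS =====

-- common specification: elements of tab at positions (from s) whose bit is 1
def pick (bs tab : List Int) (s : Nat) : List Int :=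
  match bs with
  | [] => []
  | b :: rest => (if b = 1 then [PySem.List.pyGetD tab (s : Int) 0] else []) ++ pick rest tab (s + 1)

theorem altGo_eq_pick (zo : Nat) : ∀ (i : Nat) (tab res : List Int),
    altGo zo i tab res = res ++ pick (binDigitsRev zo) tab i := by
  induction zo using Nat.strong_induction_on with
  | _ zo ih =>
    intro i tab res
    rw [altGo, binDigitsRev]
    by_cases h : zo = 0
    · simp [h, pick]
    · simp only [if_neg h]
      rw [ih (zo / 2) (Nat.div_lt_self (Nat.pos_of_ne_zero h) (by norm_num))]
      simp only [pick]
      by_cases hb : zo % 2 = 1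
      · simp [hb]
      · have h2 : zo % 2 = 0 := by omega
        simp [h2]

theorem pick_append (bs cs tab : List Int) : ∀ (s : Nat),
    pick (bs ++ cs) tab s = pick bs tab s ++ pick cs tab (s + bs.length) := by
  induction bs with
  | nil => intro s; simp [pick]
  | cons b rest ih =>
    intro s
    simp only [List.cons_append, pick, ih (s + 1), List.append_assoc, List.length_cons]
    have : s + 1 + rest.length = s + (rest.length + 1) := by omega
    rw [this]

theorem pick_replicate (k : Nat) (tab : List Int) : ∀ (s : Nat),
    pick (List.replicate k 0) tab s = [] := by
  induction k with
  | zero => intro s; simp [pick]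
  | succ n ih => intro s; simp [List.replicate_succ, pick, ih]

theorem loopA (lst : List Int) (tab : List Int) : ∀ (acc : List Int),
    (PySem.List.pyRange 0 lst.length 1).foldl
      (fun acc i => if PySem.List.pyGetD lst i 0 = 1 then acc ++ [PySem.List.pyGetD tab i 0] else acc) acc
      = acc ++ pick lst tab 0 := by
  induction lst using List.reverseRecOn with
  | nil => intro acc; simp [pick]
  | append_singleton ys b ih =>
    intro acc
    have hlen : ((ys ++ [b]).length : Int) = (ys.length : Int) + 1 := by simp
    rw [hlen, PySem.List.pyRange_one_succ_right (by positivity), List.foldl_append]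
    have hcong : (PySem.List.pyRange 0 (ys.length : Int) 1).foldl
        (fun acc i => if PySem.List.pyGetD (ys ++ [b]) i 0 = 1 then acc ++ [PySem.List.pyGetD tab i 0] else acc) acc
        = (PySem.List.pyRange 0 (ys.length : Int) 1).foldl
        (fun acc i => if PySem.List.pyGetD ys i 0 = 1 then acc ++ [PySem.List.pyGetD tab i 0] else acc) acc := by
      apply PySem.List.foldl_congr_mem
      intro a j hj
      rw [PySem.List.mem_pyRange_one] at hj
      have h1 : PySem.List.pyGetD (ys ++ [b]) j 0 = PySem.List.pyGetD ys j 0 := by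
        rw [PySem.List.pyGetD_eq_getElem _ _ hj.1 (by simp; omega),
            PySem.List.pyGetD_eq_getElem _ _ hj.1 (by omega)]
        rw [List.getElem_append_left (by omega)]
      rw [h1]
    rw [hcong, ih acc, pick_append]
    simp only [List.foldl_cons, List.foldl_nil, pick]
    have hb : PySem.List.pyGetD (ys ++ [b]) (ys.length : Int) 0 = b := by
      rw [PySem.List.pyGetD_eq_getElem _ _ (by positivity) (by simp)]
      simp
    rw [hb]
    by_cases h : b = 1 <;> simp [h, List.append_assoc]

theorem unsorted_eq (zo : Int) (tab : List Int) (h0 : 0 ≤ zo) :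
    fromzeroone zo tab = fromzeroone_alt zo tab := by
  unfold fromzeroone fromzeroone_alt
  simp only [altGo_eq_pick, loopA, pick_append, pick_replicate]
  by_cases hz : zo = 0
  · subst hz
    simp [binDigitsRev, pick]
  · have : zo.toNat ≠ 0 := by omega
    simp [hz, List.reverse_reverse]

-- ===== VERDICT (by name: the statement is the Claim_ definition above) =====
theorem fromzeroone_spec : Claim_equal_fromzeroone := by
  intro zo tab _ hpre
  unfold Spec_fromzeroone
  exact unsorted_eq zo tab hpre.1
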